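-- pv_equiv track=rewrite | github.com/zpengmei/ASUKA | asuka/hf/direct_jk.py | _choose_n_bufs
-- ===== SOURCE A (Python) =====
-- def _choose_n_bufs(nao: int, vram_budget_mb: int = 500) -> int:
--     """Power-of-2 buffer count for multi-buffer Fock accumulation.
--
--     Distributes atomicAdd contention across N independent Fock buffers.
--     Bounded by VRAM budget so that ``N * nao^2 * 8`` bytes stays under *vram_budget_mb*.
--     """
--     buf_bytes = nao * nao * 8
--     if buf_bytes <= 0:
--         return 1
--     max_bufs = max(1, int(vram_budget_mb * 1024**2 // buf_bytes))
--     max_bufs = min(max_bufs, 128)  # cap at ~SM count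
--     n = 1
--     while n * 2 <= max_bufs:
--         n *= 2
--     return n
-- ===== SOURCE B (Python) =====
-- def _choose_n_bufs(nao: int, vram_budget_mb: int = 500) -> int:
--     """Power-of-2 buffer count: closed-form largest power of two <= max_bufs."""
--     buf_bytes = nao * nao * 8
--     if buf_bytes <= 0:
--         return 1
--     max_bufs = min(max(1, vram_budget_mb * 1024**2 // buf_bytes), 128)
--     return 1 << (max_bufs.bit_length() - 1)
-- ===== Notes on version B (the rewrite author's own statement) =====
-- stated objective: idiomatic
-- what changed: Replaces the iterative doubling while-loop with a closed-form computation of the largest power of two <= max_bufs via int.bit_length.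
import Mathlib
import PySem

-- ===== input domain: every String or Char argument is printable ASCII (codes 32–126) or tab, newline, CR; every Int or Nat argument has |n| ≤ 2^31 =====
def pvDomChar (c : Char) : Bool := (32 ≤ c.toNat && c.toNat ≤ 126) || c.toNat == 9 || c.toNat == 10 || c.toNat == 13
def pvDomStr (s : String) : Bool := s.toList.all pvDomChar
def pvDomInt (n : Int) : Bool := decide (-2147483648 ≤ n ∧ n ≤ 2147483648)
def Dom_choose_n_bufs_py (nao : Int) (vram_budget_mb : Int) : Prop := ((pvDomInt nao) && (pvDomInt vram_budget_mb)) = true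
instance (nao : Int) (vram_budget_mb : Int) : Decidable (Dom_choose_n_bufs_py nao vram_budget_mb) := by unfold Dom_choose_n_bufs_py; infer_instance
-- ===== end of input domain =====

-- B replaces A's doubling while-loop by the closed form 1 << (max_bufs.bit_length()-1); same value everywhere.

-- ===== PORT A =====
-- the 'while n*2 <= max_bufs: n *= 2' loop; fuel 8 suffices since max_bufs ≤ 128 (fuel only makes it total)
def chooseLoopA (fuel : Nat) (maxBufs : Int) (n : Int) : Int :=
  match fuel with
  | 0 => n
  | fuel + 1 => if n * 2 ≤ maxBufs then chooseLoopA fuel maxBufs (n * 2) else n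

def choose_n_bufs_py (nao : Int) (vram_budget_mb : Int) : Int :=
  let buf_bytes := nao * nao * 8
  if buf_bytes ≤ 0 then 1
  else
    let max_bufs := max 1 (PySem.Int.floordiv (vram_budget_mb * 1024 ^ 2) buf_bytes)
    let max_bufs := min max_bufs 128
    chooseLoopA 8 max_bufs 1

-- ===== PORT B =====
-- 1 << (m.bit_length() - 1): for m ≥ 1, Python's m.bit_length() = Nat.size m, and 1 <<< k = 2 ^ k
def choose_n_bufs_py_alt (nao : Int) (vram_budget_mb : Int) : Int :=
  let buf_bytes := nao * nao * 8
  if buf_bytes ≤ 0 then 1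
  else
    let max_bufs := min (max 1 (PySem.Int.floordiv (vram_budget_mb * 1024 ^ 2) buf_bytes)) 128
    (2 : Int) ^ (Nat.size max_bufs.toNat - 1)

-- ===== PRECONDITION & SPEC =====
def Spec_choose_n_bufs_py (nao : Int) (vram_budget_mb : Int) (out : Int) : Prop := out = choose_n_bufs_py_alt nao vram_budget_mb
instance (nao : Int) (vram_budget_mb : Int) (out : Int) : Decidable (Spec_choose_n_bufs_py nao vram_budget_mb out) := by unfold Spec_choose_n_bufs_py; infer_instance

-- ===== CLAIM (what is proved, stated in full; the proofs are below) =====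
def Claim_equal_choose_n_bufs_py : Prop := ∀ (nao : Int) (vram_budget_mb : Int), Dom_choose_n_bufs_py nao vram_budget_mb → Spec_choose_n_bufs_py nao vram_budget_mb (choose_n_bufs_py nao vram_budget_mb)

-- ===== LEMMAS AND PROOFS =====
-- kernel-checked table: on every max_bufs value 1..128 the loop equals the closed form
theorem loop_eq_size : ∀ k : Nat, k < 128 →
    chooseLoopA 8 ((k : Int) + 1) 1 = (2 : Int) ^ (Nat.size (k + 1) - 1) := by decide

theorem loop_closed_form (m : Int) (h1 : 1 ≤ m) (h2 : m ≤ 128) :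
    chooseLoopA 8 m 1 = (2 : Int) ^ (Nat.size m.toNat - 1) := by
  have hk : m = ((m.toNat - 1 : Nat) : Int) + 1 := by omega
  have hlt : m.toNat - 1 < 128 := by omega
  have := loop_eq_size (m.toNat - 1) hlt
  rw [hk, show (((m.toNat - 1 : Nat) : Int) + 1).toNat = m.toNat - 1 + 1 by omega]
  exact this

-- ===== VERDICT (by name: the statement is the Claim_ definition above) =====
theorem choose_n_bufs_py_spec : Claim_equal_choose_n_bufs_py := by
  intro nao vram _
  unfold Spec_choose_n_bufs_py choose_n_bufs_py choose_n_bufs_py_alt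
  by_cases hb : nao * nao * 8 ≤ 0
  · simp [hb]
  · simp only [hb, if_false]
    set q := PySem.Int.floordiv (vram * 1024 ^ 2) (nao * nao * 8) with hq
    have h1 : 1 ≤ min (max 1 q) 128 := by omega
    have h2 : min (max 1 q) 128 ≤ 128 := by omega
    simpa [min_comm, min_assoc, min_left_comm] using loop_closed_form _ h1 h2
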